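-- pv_equiv track=rewrite | github.com/ACFHarbinger/WSmartPlus-Route | logic/src/policies/route_construction/meta_heuristics/simulated_annealing/solver.py | _get_route_arcs
-- ===== SOURCE A (Python) =====
-- from typing import Any, Dict, List, Optional, Tuple
--
-- def _get_route_arcs(route: List[int]) -> List[Tuple[int, int]]:
--     """Helper to extract arcs from a route."""
--     if not route:
--         return []
--     arcs = [(0, route[0])]
--     for i in range(len(route) - 1):
--         arcs.append((route[i], route[i + 1]))
--     arcs.append((route[-1], 0))
--     return arcs
-- ===== SOURCE B (Python) =====
-- from typing import List, Tuple
--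
-- def _get_route_arcs(route: List[int]) -> List[Tuple[int, int]]:
--     """Build the arc list back-to-front: walk the route in reverse carrying
--     the successor node, then reverse the collected arcs."""
--     if not route:
--         return []
--     rev_arcs = []
--     nxt = 0
--     for node in reversed(route):
--         rev_arcs.append((node, nxt))
--         nxt = node
--     rev_arcs.append((0, nxt))
--     return rev_arcs[::-1]
-- ===== Notes on version B (the rewrite author's own statement) =====
-- stated objective: alternative
-- what changed: Replaces A's forward three-part construction (prepend depot arc, index loop over route[i],route[i+1], append closing arc) with a backward single pass: traverse reversed(route) carrying the successor node to emit each arc (including the closing one) uniformly, append the depot arc last, and reverse the result.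
import Mathlib
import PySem

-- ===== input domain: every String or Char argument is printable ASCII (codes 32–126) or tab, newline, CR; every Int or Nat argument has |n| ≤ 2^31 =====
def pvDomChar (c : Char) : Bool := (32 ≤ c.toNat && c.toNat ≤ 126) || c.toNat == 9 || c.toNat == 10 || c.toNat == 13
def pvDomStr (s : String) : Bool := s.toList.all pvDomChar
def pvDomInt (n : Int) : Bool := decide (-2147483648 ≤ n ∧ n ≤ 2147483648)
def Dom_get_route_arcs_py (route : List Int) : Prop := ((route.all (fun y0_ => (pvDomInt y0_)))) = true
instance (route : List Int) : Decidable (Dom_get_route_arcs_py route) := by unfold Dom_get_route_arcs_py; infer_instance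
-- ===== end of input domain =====

-- B replaces A's forward three-part construction by a backward pass over reversed(route)
-- carrying the successor node, building the arc list back-to-front (objective: alternative).

-- ===== PORT A =====
-- if not route: return []; arcs = [(0, route[0])]; for i in range(len(route)-1):
--   arcs.append((route[i], route[i+1])); arcs.append((route[-1], 0))
def get_route_arcs_py (route : List Int) : List (Int × Int) :=
  match route with
  | [] => []
  | h :: t =>
    let arcs : List (Int × Int) := [(0, h)]
    let arcs := (PySem.List.pyRange 0 (((h :: t).length : Int) - 1) 1).foldl
      (fun acc i =>
        acc ++ [(PySem.List.pyGetD (h :: t) i 0, PySem.List.pyGetD (h :: t) (i + 1) 0)]) arcs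
    arcs ++ [(PySem.List.pyGetD (h :: t) (-1) 0, 0)]

-- ===== PORT B =====
-- if not route: return []; rev_arcs = []; nxt = 0
-- for node in reversed(route): rev_arcs.append((node, nxt)); nxt = node
-- rev_arcs.append((0, nxt)); return rev_arcs[::-1]   (rev_arcs[::-1] = List.reverse)
def get_route_arcs_py_alt (route : List Int) : List (Int × Int) :=
  match route with
  | [] => []
  | _ :: _ =>
    let st := route.reverse.foldl
      (fun (st : List (Int × Int) × Int) node => (st.1 ++ [(node, st.2)], node))
      ([], 0)
    (st.1 ++ [(0, st.2)]).reverse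

-- ===== PRECONDITION & SPEC =====
def Spec_get_route_arcs_py (route : List Int) (out : List (Int × Int)) : Prop := out = get_route_arcs_py_alt route
instance (route : List Int) (out : List (Int × Int)) : Decidable (Spec_get_route_arcs_py route out) := by unfold Spec_get_route_arcs_py; infer_instance

-- ===== CLAIM (what is proved, stated in full; the proofs are below) =====
def Claim_equal_get_route_arcs_py : Prop := ∀ (route : List Int), Dom_get_route_arcs_py route → Spec_get_route_arcs_py route (get_route_arcs_py route)

-- ===== LEMMAS AND PROOFS =====

-- reversing a zip of equal-length lists = zip of the reverses
theorem zip_reverse_of_length_eq {α β : Type} (l : List α) (m : List β)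
    (h : l.length = m.length) : (l.zip m).reverse = l.reverse.zip m.reverse := by
  induction l generalizing m with
  | nil => cases m with
    | nil => simp
    | cons b m => simp at h
  | cons a l ih =>
    cases m with
    | nil => simp at h
    | cons b m =>
      simp only [List.length_cons, Nat.add_right_cancel_iff] at h
      simp only [List.zip_cons_cons, List.reverse_cons, ih m h]
      rw [List.zip_append (by simp [h])]
      simp

-- B's backward fold, characterised: arcs (node, successor) in reversed order, plus the last prev
theorem fold_char (l : List Int) (acc : List (Int × Int)) (nxt : Int) :
    l.foldl (fun (st : List (Int × Int) × Int) node => (st.1 ++ [(node, st.2)], node)) (acc, nxt)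
      = (acc ++ l.zip (nxt :: l), l.getLastD nxt) := by
  induction l generalizing acc nxt with
  | nil => simp
  | cons a l ih =>
    simp only [List.foldl_cons, ih, List.zip_cons_cons, List.getLastD_cons, List.append_assoc,
      List.cons_append, List.nil_append]

-- A's indexed middle arcs plus closing arc = zipping the route against its shifted-and-padded self
theorem zip_shift_eq_indexed (t : List Int) (h : Int) :
    (h :: t).zip (t ++ [(0:Int)]) =
      (List.range t.length).map
        (fun k => ((h :: t).getD k 0, (h :: t).getD (k + 1) 0)) ++ [(((h :: t).getLast (by simp)), 0)] := by
  induction t generalizing h with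
  | nil => simp
  | cons a t' ih =>
    simp only [List.cons_append, List.zip_cons_cons, List.length_cons, List.range_succ_eq_map,
      List.map_cons, List.map_map, List.getD_cons_zero, List.getD_cons_succ, Function.comp_def]
    rw [ih a]
    simp [List.getLast_cons]

-- ===== VERDICT =====
theorem get_route_arcs_py_spec : Claim_equal_get_route_arcs_py := by
  intro route _
  unfold Spec_get_route_arcs_py
  match route with
  | [] => rfl
  | h :: t =>
    have hA : get_route_arcs_py (h :: t) = (0, h) :: ((h :: t).zip (t ++ [(0:Int)])) := by
      unfold get_route_arcs_py
      simp only [List.length_cons]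
      rw [PySem.List.foldl_append_singleton_eq_map]
      have hn : ((t.length + 1 : Nat) : Int) - 1 = (t.length : Int) := by push_cast; ring
      rw [hn, PySem.List.pyRange_zero_natCast]
      rw [zip_shift_eq_indexed]
      rw [PySem.List.pyGetD_neg_one (h :: t) 0 (by simp)]
      simp only [List.map_map, List.cons_append, List.nil_append]
      congr 2
      apply List.map_congr_left
      intro k hk
      simp only [List.mem_range] at hk
      have h1 : PySem.List.pyGetD (h :: t) (k : Int) 0 = (h :: t).getD k 0 := by
        simp [PySem.List.pyGetD_natCast]
      have h2 : PySem.List.pyGetD (h :: t) ((k : Int) + 1) 0 = (h :: t).getD (k + 1) 0 := by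
        have : ((k : Int) + 1) = ((k + 1 : Nat) : Int) := by push_cast; ring
        rw [this, PySem.List.pyGetD_natCast]
      simp only [Function.comp_apply]
      rw [h1, h2]
    have hB : get_route_arcs_py_alt (h :: t) = (0, h) :: ((h :: t).zip (t ++ [(0:Int)])) := by
      unfold get_route_arcs_py_alt
      simp only []
      rw [fold_char]
      have hrev : (h :: t).reverse = t.reverse ++ [h] := by simp
      rw [hrev, List.getLastD_concat, List.nil_append]
      have hz : (t.reverse ++ [h]).zip ((0:Int) :: (t.reverse ++ [h]))
          = (t.reverse ++ [h]).zip ((0:Int) :: t.reverse) := by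
        have : ((0:Int) :: (t.reverse ++ [h])) = ((0:Int) :: t.reverse) ++ [h] := by simp
        rw [this]
        have := List.zip_append (l₁ := t.reverse ++ [h]) (r₁ := ([] : List Int))
          (l₂ := (0:Int) :: t.reverse) (r₂ := [h]) (by simp)
        simpa using this
      rw [hz]
      have hgoal : ((0, h) :: ((h :: t).zip (t ++ [(0:Int)]))).reverse
          = (t.reverse ++ [h]).zip ((0:Int) :: t.reverse) ++ [((0:Int), h)] := by
        rw [List.reverse_cons, zip_reverse_of_length_eq _ _ (by simp)]
        simp
      calc ((t.reverse ++ [h]).zip ((0:Int) :: t.reverse) ++ [((0:Int), h)]).reverse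
          = (((0, h) :: ((h :: t).zip (t ++ [(0:Int)]))).reverse).reverse := by rw [hgoal]
        _ = (0, h) :: ((h :: t).zip (t ++ [(0:Int)])) := List.reverse_reverse _
    rw [hA, hB]
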